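-- pv_equiv track=rewrite | github.com/BNAadministrator3/BS-denoising | C_3_3_Phas_synthesis.py | Thresholding
-- ===== SOURCE A (Python) =====
-- result = [466,-512,62]
--
-- def Thresholding(seq, peak = result[0], trough = result[1], width = result[2]):
--     position = [] # The elements of the list is a tuple
--     for st,value in enumerate(seq):
--         if ( len(position) > 0 ) and ( st in range(position[-1][0], position[-1][1]+1) ):
--             continue
--         flag = False
--         if value >= peak:
--             clip = seq[st+1:st+width+1]
--             for ofset, point in enumerate(clip):
--                 if point <= trough:
--                     flag = True
--                     break
--         elif value <= trough:
--             clip = seq[st+1:st+width+1]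
--             for ofset, point in enumerate(clip):
--                 if point >= peak:
--                     flag = True
--                     break
--         if flag:
--             position.append( (st, st+1+ofset) )
--     return position
-- ===== SOURCE B (Python) =====
-- result = [466, -512, 62]
--
-- def Thresholding(seq, peak=result[0], trough=result[1], width=result[2]):
--     # O(n): precompute, for every index i, the nearest later index whose value
--     # crosses the opposite threshold; then jump through the signal, checking each
--     # candidate against the effective window bound in O(1).
--     n = len(seq)
--     next_low = [None] * n   # nearest j > i with seq[j] <= trough
--     next_high = [None] * n  # nearest j > i with seq[j] >= peak
--     nl = nh = None
--     for i in range(n - 1, -1, -1):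
--         next_low[i] = nl
--         next_high[i] = nh
--         if seq[i] <= trough:
--             nl = i
--         if seq[i] >= peak:
--             nh = i
--     position = []
--     i = 0
--     while i < n:
--         v = seq[i]
--         if v >= peak:
--             j = next_low[i]
--         elif v <= trough:
--             j = next_high[i]
--         else:
--             j = None
--         _, hi, _ = slice(i + 1, i + width + 1).indices(n)  # effective window end
--         if j is not None and j < hi:
--             position.append((i, j))
--             i = j + 1
--         else:
--             i += 1
--     return position
-- ===== Notes on version B (the rewrite author's own statement) =====
-- stated objective: faster
-- what changed: A rescans the width-long lookahead window from scratch at every position; B precomputes, in one backward pass, for every index the nearest later index crossing the opposite threshold (next_low/next_high arrays) and then walks the signal once, deciding each position with an O(1) lookup against the effective window bound.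
import Mathlib
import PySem

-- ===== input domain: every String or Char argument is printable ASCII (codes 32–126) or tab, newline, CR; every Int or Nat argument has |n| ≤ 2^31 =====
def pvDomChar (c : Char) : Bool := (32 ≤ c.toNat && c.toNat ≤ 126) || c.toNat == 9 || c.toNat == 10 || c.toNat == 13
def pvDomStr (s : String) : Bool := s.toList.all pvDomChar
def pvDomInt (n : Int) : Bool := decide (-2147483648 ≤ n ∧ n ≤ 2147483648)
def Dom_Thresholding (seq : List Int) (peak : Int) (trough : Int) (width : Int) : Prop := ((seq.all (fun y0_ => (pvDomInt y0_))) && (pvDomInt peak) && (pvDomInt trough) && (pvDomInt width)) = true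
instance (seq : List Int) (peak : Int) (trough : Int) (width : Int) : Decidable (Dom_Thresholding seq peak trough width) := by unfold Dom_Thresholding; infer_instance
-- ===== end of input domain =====

-- B replaces A's per-position rescan of the lookahead window by two precomputed
-- next-crossing-index arrays plus an O(1) window-bound check per position (objective: faster).

-- ===== PORT A =====
-- inner 'for ofset, point in enumerate(clip): if <cond>: break' loop, returning the
-- break offset (none = loop finishes without break, flag stays False, nothing appended)
def scanClip (clip : List Int) (p : Int → Bool) (k : Nat) : Option Nat :=
  match clip with
  | [] => none
  | x :: xs => if p x then some k else scanClip xs p (k + 1)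

-- A's loop body for one enumerated element stv = (st, value)
def stepA (seq : List Int) (peak trough width : Int)
    (position : List (Int × Int)) (stv : Int × Int) : List (Int × Int) :=
  let st := stv.1
  let value := stv.2
  -- 'if len(position) > 0 and st in range(position[-1][0], position[-1][1]+1): continue'
  let skip : Bool :=
    match position.getLast? with
    | some (s, e) => decide (s ≤ st ∧ st ≤ e)
    | none => false
  if skip then position
  else
    -- flag/ofset of the two symmetric inner scans over clip = seq[st+1:st+width+1]
    let found : Option Nat :=
      if value ≥ peak then
        scanClip (PySem.List.slice seq (some (st + 1)) (some (st + width + 1)))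
          (fun point => point ≤ trough) 0
      else if value ≤ trough then
        scanClip (PySem.List.slice seq (some (st + 1)) (some (st + width + 1)))
          (fun point => point ≥ peak) 0
      else none
    match found with
    | some ofs => position ++ [(st, st + 1 + (ofs : Int))]
    | none => position

def Thresholding (seq : List Int) (peak : Int) (trough : Int) (width : Int) : List (Int × Int) :=
  (PySem.List.enumerate seq).foldl (stepA seq peak trough width) []

-- ===== PORT B =====
-- backward pass of B: next[i] = nearest index j > i with p seq[j]
-- ('for i in range(n-1,-1,-1): next[i] = nl; if p(seq[i]): nl = i')
def buildNext (xs : List Int) (i : Nat) (p : Int → Bool) : List (Option Nat) × Option Nat :=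
  match xs with
  | [] => ([], none)
  | x :: t =>
    let r := buildNext t (i + 1) p
    (r.2 :: r.1, if p x then some i else r.2)

-- the 'while i < n' loop; fuel = n suffices since i strictly increases each step
def goB (seq : List Int) (nl nh : List (Option Nat)) (peak trough width : Int) :
    Nat → Nat → List (Int × Int)
  | 0, _ => []
  | fuel + 1, i =>
    if i < seq.length then
      let v := seq.getD i 0
      let j : Option Nat :=
        if v ≥ peak then nl.getD i none
        else if v ≤ trough then nh.getD i none
        else none
      -- effective window end: '_, hi, _ = slice(i+1, i+width+1).indices(n)'
      let hi := PySem.List.clampIdx seq.length ((i : Int) + width + 1)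
      match j with
      | some jv =>
        if jv < hi then ((i : Int), (jv : Int)) :: goB seq nl nh peak trough width fuel (jv + 1)
        else goB seq nl nh peak trough width fuel (i + 1)
      | none => goB seq nl nh peak trough width fuel (i + 1)
    else []

def Thresholding_alt (seq : List Int) (peak : Int) (trough : Int) (width : Int) : List (Int × Int) :=
  let nl := (buildNext seq 0 (fun x => x ≤ trough)).1
  let nh := (buildNext seq 0 (fun x => x ≥ peak)).1
  goB seq nl nh peak trough width seq.length 0

-- ===== PRECONDITION & SPEC =====
def Spec_Thresholding (seq : List Int) (peak : Int) (trough : Int) (width : Int) (out : List (Int × Int)) : Prop := out = Thresholding_alt seq peak trough width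
instance (seq : List Int) (peak : Int) (trough : Int) (width : Int) (out : List (Int × Int)) : Decidable (Spec_Thresholding seq peak trough width out) := by unfold Spec_Thresholding; infer_instance

-- ===== CLAIM (what is proved, stated in full; the proofs are below) =====
def Claim_equal_Thresholding : Prop := ∀ (seq : List Int) (peak : Int) (trough : Int) (width : Int), Dom_Thresholding seq peak trough width → Spec_Thresholding seq peak trough width (Thresholding seq peak trough width)

-- ===== LEMMAS AND PROOFS =====

-- A's per-index search result (what stepA computes at an unskipped index i)
def pickFound (seq : List Int) (peak trough width : Int) (i : Nat) : Option Nat :=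
  let v := seq.getD i 0
  if v ≥ peak then
    scanClip (PySem.List.slice seq (some ((i : Int) + 1)) (some ((i : Int) + width + 1)))
      (fun point => point ≤ trough) 0
  else if v ≤ trough then
    scanClip (PySem.List.slice seq (some ((i : Int) + 1)) (some ((i : Int) + width + 1)))
      (fun point => point ≥ peak) 0
  else none

-- index-jumping reference form of A's loop (the skipped indices are jumped over)
def goA (seq : List Int) (peak trough width : Int) (i : Nat) : List (Int × Int) :=
  if _h : i < seq.length then
    match pickFound seq peak trough width i with
    | some ofs =>
      ((i : Int), ((i + 1 + ofs : Nat) : Int)) :: goA seq peak trough width (i + 1 + ofs + 1)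
    | none => goA seq peak trough width (i + 1)
  else []
termination_by seq.length - i
decreasing_by all_goals omega


theorem scanClip_shift (clip : List Int) (p : Int → Bool) (k : Nat) :
    scanClip clip p k = (scanClip clip p 0).map (fun t => k + t) := by
  induction clip generalizing k with
  | nil => rfl
  | cons x xs ih =>
    simp only [scanClip]
    split
    · simp
    · rw [ih (k+1), ih 1, Option.map_map]
      cases scanClip xs p 0 <;> simp [Nat.add_comm, Nat.add_left_comm]

theorem scanClip_take (clip : List Int) (p : Int → Bool) (m : Nat) :
    scanClip (clip.take m) p 0 =
      (scanClip clip p 0).bind (fun o => if o < m then some o else none) := by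
  induction clip generalizing m with
  | nil => simp [scanClip]
  | cons x xs ih =>
    cases m with
    | zero =>
      simp only [List.take_zero, scanClip]
      split
      · simp
      · rw [scanClip_shift xs p 1]
        cases scanClip xs p 0 <;> simp
    | succ m =>
      simp only [List.take_succ_cons, scanClip]
      split
      · simp
      · rw [scanClip_shift (List.take m xs) p (0+1), scanClip_shift xs p (0+1), ih m]
        cases h : scanClip xs p 0 with
        | none => simp
        | some o =>
          simp only [Option.map_some, Option.bind_some]
          by_cases ho : o < m <;> simp [ho] <;> omega

theorem buildNext_snd (xs : List Int) (s : Nat) (p : Int → Bool) :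
    (buildNext xs s p).2 = scanClip xs p s := by
  induction xs generalizing s with
  | nil => rfl
  | cons x t ih => simp only [buildNext, scanClip]; split <;> simp_all

theorem buildNext_fst (xs : List Int) (s : Nat) (p : Int → Bool) (t : Nat) :
    ((buildNext xs s p).1).getD t none = scanClip (xs.drop (t + 1)) p (s + t + 1) := by
  induction xs generalizing s t with
  | nil => simp [buildNext, scanClip]
  | cons x m ih =>
    cases t with
    | zero => simpa [buildNext] using buildNext_snd m (s+1) p
    | succ t =>
      simp only [buildNext, List.getD_cons_succ, List.drop_succ_cons]
      rw [ih (s+1) t]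
      congr 1
      omega

theorem slice_nat_start (xs : List Int) (m : Nat) (b : Int) (hm : m ≤ xs.length) :
    PySem.List.slice xs (some (m : Int)) (some b) =
      (xs.drop m).take (PySem.List.clampIdx xs.length b - m) := by
  simp [PySem.List.slice, Nat.min_eq_left hm]

theorem branch_eq (seq : List Int) (p : Int → Bool) (i hi : Nat) :
    scanClip ((seq.drop (i+1)).take (hi - (i + 1))) p 0 =
      (((buildNext seq 0 p).1).getD i none).bind
        (fun jv => if jv < hi then some (jv - (i + 1)) else none) := by
  rw [scanClip_take, buildNext_fst, scanClip_shift (seq.drop (i+1)) p (0+i+1)]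
  cases scanClip (seq.drop (i+1)) p 0 with
  | none => simp
  | some o =>
    simp only [Option.map_some, Option.bind_some]
    by_cases hb : o < hi - (i + 1)
    · have hb2 : 0 + i + 1 + o < hi := by omega
      simp only [hb, if_true, hb2, Option.some.injEq]
      omega
    · have hb2 : ¬(0 + i + 1 + o < hi) := by omega
      simp only [hb, if_false, if_neg hb2]

theorem pick_eq (seq : List Int) (peak trough width : Int) (i : Nat) (hi : i < seq.length) :
    pickFound seq peak trough width i =
      (if seq.getD i 0 ≥ peak then ((buildNext seq 0 (fun x => x ≤ trough)).1).getD i none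
       else if seq.getD i 0 ≤ trough then ((buildNext seq 0 (fun x => x ≥ peak)).1).getD i none
       else none).bind
        (fun jv => if jv < PySem.List.clampIdx seq.length ((i : Int) + width + 1)
                   then some (jv - (i + 1)) else none) := by
  have hc : ((i : Int) + 1) = ((i + 1 : Nat) : Int) := by push_cast; ring
  unfold pickFound
  simp only []
  rw [hc, slice_nat_start seq (i+1) _ (by omega)]
  split_ifs with h1 h2
  · exact branch_eq seq _ i _
  · exact branch_eq seq _ i _
  · rfl

theorem scanClip_ge {clip : List Int} {p : Int → Bool} {k j : Nat}
    (h : scanClip clip p k = some j) : k ≤ j := by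
  induction clip generalizing k with
  | nil => simp [scanClip] at h
  | cons x xs ih =>
    simp only [scanClip] at h
    split at h
    · cases h; omega
    · exact Nat.le_of_succ_le (ih h)

theorem goA_eq_goB (seq : List Int) (peak trough width : Int) (fuel : Nat) :
    ∀ i : Nat, seq.length - i ≤ fuel →
    goA seq peak trough width i =
      goB seq (buildNext seq 0 (fun x => x ≤ trough)).1 (buildNext seq 0 (fun x => x ≥ peak)).1
        peak trough width fuel i := by
  induction fuel with
  | zero =>
    intro i hf
    have hn : ¬ i < seq.length := by omega
    rw [goA, dif_neg hn]
    rfl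
  | succ fuel ih =>
    intro i hf
    by_cases h : i < seq.length
    · rw [goA, dif_pos h, pick_eq seq peak trough width i h]
      simp only [goB, if_pos h]
      cases hj : (if seq.getD i 0 ≥ peak then ((buildNext seq 0 (fun x => x ≤ trough)).1).getD i none
                  else if seq.getD i 0 ≤ trough then ((buildNext seq 0 (fun x => x ≥ peak)).1).getD i none
                  else none) with
      | none => simp only [Option.bind_none]; exact ih (i+1) (by omega)
      | some jv =>
        have hjv : i + 1 ≤ jv := by
          -- jv comes from a buildNext lookup, hence from a scanClip at start i+1
          split_ifs at hj with h1 h2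
          · rw [buildNext_fst] at hj; exact (by simpa using scanClip_ge hj)
          · rw [buildNext_fst] at hj; exact (by simpa using scanClip_ge hj)
        simp only [Option.bind_some]
        by_cases hlt : jv < PySem.List.clampIdx seq.length ((i : Int) + width + 1)
        · simp only [if_pos hlt]
          have hid : i + 1 + (jv - (i + 1)) = jv := by omega
          rw [hid]
          congr 1
          exact ih (jv + 1) (by omega)
        · simp only [if_neg hlt]
          exact ih (i + 1) (by omega)
    · rw [goA, dif_neg h]
      simp only [goB, if_neg h]

theorem stepA_skip (seq : List Int) (peak trough width : Int)
    (acc : List (Int × Int)) (st x s e : Int)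
    (hl : acc.getLast? = some (s, e)) (h1 : s ≤ st) (h2 : st ≤ e) :
    stepA seq peak trough width acc (st, x) = acc := by
  simp [stepA, hl, h1, h2]

theorem stepA_go (seq : List Int) (peak trough width : Int)
    (acc : List (Int × Int)) (i : Nat) (x : Int)
    (hl : ∀ q ∈ acc.getLast?, q.2 < (i : Int)) (hx : seq.getD i 0 = x) :
    stepA seq peak trough width acc ((i : Int), x) =
      match pickFound seq peak trough width i with
      | some ofs => acc ++ [((i : Int), ((i + 1 + ofs : Nat) : Int))]
      | none => acc := by
  have hskip : (match acc.getLast? with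
      | some (s, e) => decide (s ≤ (i : Int) ∧ (i : Int) ≤ e)
      | none => false) = false := by
    cases hg : acc.getLast? with
    | none => rfl
    | some q =>
      have := hl q (by simp [hg])
      cases q
      simp only [decide_eq_false_iff_not, not_and]
      intro _
      omega
  simp only [stepA, hskip, Bool.false_eq_true, if_false, pickFound, ← hx]
  cases hf : (if seq.getD i 0 ≥ peak then
        scanClip (PySem.List.slice seq (some ((i:Int) + 1)) (some ((i:Int) + width + 1)))
          (fun point => point ≤ trough) 0
      else if seq.getD i 0 ≤ trough then
        scanClip (PySem.List.slice seq (some ((i:Int) + 1)) (some ((i:Int) + width + 1)))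
          (fun point => point ≥ peak) 0
      else none) with
  | none => simp
  | some ofs =>
    have hcast : (i : Int) + 1 + (ofs : Int) = ((i + 1 + ofs : Nat) : Int) := by push_cast; ring
    simp only [hcast]

theorem fold_skip (seq : List Int) (peak trough width : Int) :
    ∀ (m : List Int) (k : Nat) (acc : List (Int × Int)) (s : Int) (eN : Nat),
      acc.getLast? = some (s, (eN : Int)) → s ≤ (k : Int) → k ≤ eN + 1 →
      (PySem.List.enumerate m (k : Int)).foldl (stepA seq peak trough width) acc =
      (PySem.List.enumerate (m.drop (eN + 1 - k)) ((eN + 1 : Nat) : Int)).foldl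
        (stepA seq peak trough width) acc := by
  intro m
  induction m with
  | nil => intro k acc s eN _ _ _; simp [PySem.List.enumerate]
  | cons x t ih =>
    intro k acc s eN hg hs hk
    by_cases hke : k = eN + 1
    · subst hke; simp
    · have hke' : k ≤ eN := by omega
      rw [PySem.List.enumerate_cons, List.foldl_cons,
        stepA_skip seq peak trough width acc (k : Int) x s (eN : Int) hg hs (by exact_mod_cast hke')]
      have hd : (x :: t).drop (eN + 1 - k) = t.drop (eN + 1 - (k + 1)) := by
        have h1 : eN + 1 - k = (eN + 1 - (k + 1)) + 1 := by omega
        rw [h1, List.drop_succ_cons]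
      have hc : (k : Int) + 1 = ((k + 1 : Nat) : Int) := by push_cast; ring
      rw [hc, ih (k + 1) acc s eN hg (by push_cast; omega) (by omega), hd]

theorem fold_eq_goA_aux (seq : List Int) (peak trough width : Int) :
    ∀ (d : Nat), ∀ (i : Nat) (acc : List (Int × Int)), seq.length - i ≤ d →
      (∀ q ∈ acc.getLast?, q.1 ≤ (i : Int) ∧ q.2 < (i : Int)) →
      (PySem.List.enumerate (seq.drop i) (i : Int)).foldl (stepA seq peak trough width) acc =
        acc ++ goA seq peak trough width i := by
  intro d
  induction d with
  | zero =>
    intro i acc hd _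
    have hn : seq.length ≤ i := by omega
    rw [List.drop_of_length_le hn, goA, dif_neg (by omega)]
    simp [PySem.List.enumerate]
  | succ d ih =>
    intro i acc hd hacc
    by_cases h : i < seq.length
    · have hcons : seq.drop i = seq[i] :: seq.drop (i + 1) := List.drop_eq_getElem_cons h
      rw [hcons, PySem.List.enumerate_cons, List.foldl_cons,
        stepA_go seq peak trough width acc i seq[i]
          (fun q hq => (hacc q hq).2) (List.getD_eq_getElem seq 0 h)]
      have hc : (i : Int) + 1 = ((i + 1 : Nat) : Int) := by push_cast; ring
      cases hp : pickFound seq peak trough width i with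
      | none =>
        simp only []
        rw [hc, ih (i + 1) acc (by omega)
          (fun q hq => ⟨(hacc q hq).1.trans (by push_cast; omega), (hacc q hq).2.trans (by push_cast; omega)⟩)]
        conv_rhs => rw [goA, dif_pos h, hp]
      | some ofs =>
        simp only []
        rw [hc, fold_skip seq peak trough width (seq.drop (i + 1)) (i + 1)
            (acc ++ [((i : Int), ((i + 1 + ofs : Nat) : Int))]) (i : Int) (i + 1 + ofs)
            (List.getLast?_concat) (by push_cast; omega) (by omega)]
        have hdd : (seq.drop (i + 1)).drop (i + 1 + ofs + 1 - (i + 1)) = seq.drop (i + 1 + ofs + 1) := by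
          rw [List.drop_drop]
          congr 1
          omega
        rw [hdd, ih (i + 1 + ofs + 1) (acc ++ [((i : Int), ((i + 1 + ofs : Nat) : Int))]) (by omega)
          (by
            intro q hq
            rw [List.getLast?_concat, Option.mem_some_iff] at hq
            subst hq
            constructor <;> push_cast <;> omega)]
        conv_rhs => rw [goA, dif_pos h, hp]
        simp
    · have hn : seq.length ≤ i := by omega
      rw [List.drop_of_length_le hn, goA, dif_neg (by omega)]
      simp [PySem.List.enumerate]

theorem fold_eq_goA (seq : List Int) (peak trough width : Int) :
    ∀ (i : Nat) (acc : List (Int × Int)),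
      (∀ q ∈ acc.getLast?, q.1 ≤ (i : Int) ∧ q.2 < (i : Int)) →
      (PySem.List.enumerate (seq.drop i) (i : Int)).foldl (stepA seq peak trough width) acc =
        acc ++ goA seq peak trough width i :=
  fun i acc h => fold_eq_goA_aux seq peak trough width seq.length i acc (by omega) h

-- ===== VERDICT (by name: the statement is the Claim_ definition above) =====
theorem Thresholding_spec : Claim_equal_Thresholding := by
  intro seq peak trough width _
  unfold Spec_Thresholding
  have h0 : Thresholding seq peak trough width = goA seq peak trough width 0 := by
    have h := fold_eq_goA seq peak trough width 0 [] (by simp)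
    simpa [Thresholding] using h
  rw [h0, goA_eq_goB seq peak trough width seq.length 0 (by omega)]
  rfl
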